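-- pv_equiv track=rewrite | github.com/FunkoSA/-HW-Python_3 | TASK5.py | sign_change
-- ===== SOURCE A (Python) =====
-- def sign_change (array):
--     '''Смена знака в развернутом массиве и удаление последнего элемента'''
--     result_array=[]
--     for i in range (len(array)):
--         if i %2 == 0:
--             result_array.append(-1*array[i])
--         else:
--             result_array.append(array[i])
--     result_array.pop()
--     return result_array
-- ===== SOURCE B (Python) =====
-- def sign_change(array):
--     '''Negate the even-indexed elements by strided slice assignment, then drop the last element.'''
--     result = list(array)
--     result[::2] = [-x for x in result[::2]]
--     return result[:-1]
-- ===== Notes on version B (the rewrite author's own statement) =====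
-- stated objective: alternative
-- what changed: Replaces the indexed range-loop with the i%2 branch by copying the list and negating the even-indexed elements with one strided slice assignment result[::2], then dropping the last element with a [:-1] slice instead of .pop().
import Mathlib
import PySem

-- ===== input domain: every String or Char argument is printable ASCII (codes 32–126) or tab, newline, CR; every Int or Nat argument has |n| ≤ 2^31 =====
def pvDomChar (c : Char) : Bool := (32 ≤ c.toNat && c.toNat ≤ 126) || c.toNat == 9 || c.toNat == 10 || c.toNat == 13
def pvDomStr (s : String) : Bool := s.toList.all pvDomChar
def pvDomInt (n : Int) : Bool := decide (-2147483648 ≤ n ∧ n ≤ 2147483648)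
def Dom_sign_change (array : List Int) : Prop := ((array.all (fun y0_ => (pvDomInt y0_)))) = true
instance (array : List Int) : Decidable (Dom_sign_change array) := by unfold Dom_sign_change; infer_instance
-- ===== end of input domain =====

-- B replaces A's indexed range-loop with i%2 branching by a pairwise structural recursion
-- (two elements per step) and replaces .pop() by a [:-1] slice; return-value equivalence on nonempty input.

-- ===== PORT A =====
def sign_change (array : List Int) : List Int :=
  let result_array : List Int :=
    (PySem.List.pyRange 0 array.length 1).foldl
      (fun acc i =>
        if PySem.Int.mod i 2 == 0 then acc ++ [-1 * PySem.List.pyGetD array i 0]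
        else acc ++ [PySem.List.pyGetD array i 0]) []
  match PySem.List.pop? result_array (-1) with
  | some (_, rest) => rest
  | none => []   -- result_array.pop() raises IndexError here; excluded by Pre_

-- ===== PORT B =====
-- stride2 xs = xs[::2]; setStride2 xs vs = xs with 'xs[::2] = vs' performed (hand port of the
-- strided slice read / slice assignment, exact when vs has length len(xs[::2]) as in Source B)
def stride2 : List Int → List Int
  | [] => []
  | [x] => [x]
  | x :: _ :: rest => x :: stride2 rest

def setStride2 : List Int → List Int → List Int
  | [], _ => []
  | x :: rest, [] => x :: rest
  | _ :: [], v :: _ => [v]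
  | _ :: y :: rest, v :: vs => v :: y :: setStride2 rest vs

def sign_change_alt (array : List Int) : List Int :=
  PySem.List.slice (setStride2 array ((stride2 array).map (fun x => -x))) none (some (-1))

-- ===== PRECONDITION & SPEC =====
-- Pre_ excludes only the empty list, on which A's .pop() raises IndexError.
def Pre_sign_change (array : List Int) : Prop := array ≠ []
instance (array : List Int) : Decidable (Pre_sign_change array) := by unfold Pre_sign_change; infer_instance
def pvWitness_sign_change : List Int := [3, -4, 5]

def Spec_sign_change (array : List Int) (out : List Int) : Prop := out = sign_change_alt array
instance (array : List Int) (out : List Int) : Decidable (Spec_sign_change array out) := by unfold Spec_sign_change; infer_instance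

-- ===== CLAIM (what is proved, stated in full; the proofs are below) =====
def Claim_equal_sign_change : Prop := ∀ (array : List Int), Dom_sign_change array → Pre_sign_change array → Spec_sign_change array (sign_change array)

-- ===== LEMMAS AND PROOFS =====

-- proof-side helper: the even-index negation as one pairwise recursion
def negAlt : List Int → List Int
  | [] => []
  | [x] => [-x]
  | x :: y :: rest => -x :: y :: negAlt rest

lemma combo_eq_negAlt (xs : List Int) :
    setStride2 xs ((stride2 xs).map (fun x => -x)) = negAlt xs := by
  induction xs using negAlt.induct with
  | case1 => rfl
  | case2 x => rfl
  | case3 x y rest ih => simp only [stride2, setStride2, negAlt, List.map_cons, ih]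

lemma negAlt_length (xs : List Int) : (negAlt xs).length = xs.length := by
  induction xs using negAlt.induct <;> simp [negAlt, *]

lemma negAlt_eq (xs : List Int) :
    (List.range xs.length).map
      (fun k => if k % 2 = 0 then -xs.getD k 0 else xs.getD k 0) = negAlt xs := by
  induction xs using negAlt.induct with
  | case1 => simp [negAlt]
  | case2 x => simp [negAlt]
  | case3 x y rest ih =>
    simp only [List.length_cons]
    rw [List.range_succ_eq_map, List.range_succ_eq_map]
    simp only [List.map_cons, List.map_map]
    simp only [negAlt]
    refine List.cons_eq_cons.mpr ⟨by simp, List.cons_eq_cons.mpr ⟨by simp, ?_⟩⟩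
    rw [← ih]
    apply List.map_congr_left
    intro k _
    have hmod : (k + 1 + 1) % 2 = k % 2 := by omega
    simp [Function.comp, hmod]

theorem sign_change_eq_dropLast (array : List Int) (h : array ≠ []) :
    sign_change array = (negAlt array).dropLast := by
  unfold sign_change
  have hbody : (fun (acc : List Int) (i : Int) =>
        if PySem.Int.mod i 2 == 0 then acc ++ [-1 * PySem.List.pyGetD array i 0]
        else acc ++ [PySem.List.pyGetD array i 0])
      = (fun acc i => acc ++ [if PySem.Int.mod i 2 == 0 then -1 * PySem.List.pyGetD array i 0
        else PySem.List.pyGetD array i 0]) := by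
    funext acc i
    by_cases hc : (PySem.Int.mod i 2 == 0) = true
    · rw [if_pos hc, if_pos hc]
    · rw [if_neg hc, if_neg hc]
  rw [hbody, PySem.List.foldl_append_singleton_eq_map, List.nil_append,
    PySem.List.pyRange_one, List.map_map]
  have hr : ((array.length : Int) - 0).toNat = array.length := by omega
  rw [hr]
  have hmap : (List.range array.length).map
      ((fun i => if PySem.Int.mod i 2 == 0 then -1 * PySem.List.pyGetD array i 0
        else PySem.List.pyGetD array i 0) ∘ fun k => (0 : Int) + (k : Nat))
      = (List.range array.length).map
      (fun k => if k % 2 = 0 then -array.getD k 0 else array.getD k 0) := by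
    apply List.map_congr_left
    intro k _
    simp only [Function.comp_apply, zero_add, PySem.List.pyGetD_natCast]
    by_cases hk : k % 2 = 0
    · have h1 : (PySem.Int.mod (k : Int) 2 == 0) = true := by
        simp [PySem.Int.mod, Int.fmod_eq_emod]
        omega
      rw [if_pos h1, if_pos hk, neg_one_mul]
    · have h1 : ¬ (PySem.Int.mod (k : Int) 2 == 0) = true := by
        simp [PySem.Int.mod, Int.fmod_eq_emod]
        omega
      rw [if_neg h1, if_neg hk]
  rw [hmap, negAlt_eq]
  have hne : negAlt array ≠ [] := by
    intro hc
    have := negAlt_length array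
    rw [hc] at this
    simp at this
    exact h (List.eq_nil_of_length_eq_zero this.symm)
  show (match PySem.List.pop? (negAlt array) with
    | some (_, rest) => rest
    | none => ([] : List Int)) = (negAlt array).dropLast
  conv_lhs => rw [(List.dropLast_append_getLast hne).symm]
  rw [PySem.List.pop?_last]

-- ===== VERDICT (by name: the statement is the Claim_ definition above) =====
theorem sign_change_spec : Claim_equal_sign_change := by
  intro array _ hpre
  unfold Spec_sign_change sign_change_alt
  rw [sign_change_eq_dropLast array hpre, combo_eq_negAlt, PySem.List.slice_to_neg_one]
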